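-- pv_equiv track=rewrite | github.com/eyescosmos/eyescosmos.github.io | scripts/generate_sitemap.py | counterpart_rel
-- ===== SOURCE A (Python) =====
-- def counterpart_rel(rel: str) -> tuple[str, str] | None:
--     pairs = (
--         ("photographers/", "en/photographers/"),
--         ("eras/", "en/eras/"),
--         ("countries/", "en/countries/"),
--         ("movements/", "en/movements/"),
--     )
--     if rel == "index.html":
--         return "index.html", "en/index.html"
--     if rel == "en/index.html":
--         return "index.html", "en/index.html"
--     if rel == "archive.html":
--         return "archive.html", "en/archive.html"
--     if rel == "en/archive.html":
--         return "archive.html", "en/archive.html"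
--     for ja_prefix, en_prefix in pairs:
--         if rel.startswith(ja_prefix):
--             return rel, en_prefix + rel[len(ja_prefix):]
--         if rel.startswith(en_prefix):
--             return ja_prefix + rel[len(en_prefix):], rel
--     return None
-- ===== SOURCE B (Python) =====
-- def counterpart_rel(rel: str) -> tuple[str, str] | None:
--     # Normalize: every EN counterpart is exactly "en/" + its JA page.
--     if rel.startswith("en/"):
--         ja, en = rel[3:], rel
--     else:
--         ja, en = rel, "en/" + rel
--     if ja in ("index.html", "archive.html") or any(
--         ja.startswith(p)
--         for p in ("photographers/", "eras/", "countries/", "movements/")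
--     ):
--         return ja, en
--     return None
-- ===== Notes on version B (the rewrite author's own statement) =====
-- stated objective: simpler
-- what changed: Replaces A's four exact-equality guards plus a two-orientation loop over (ja,en) prefix pairs with a single normalization (strip/add the 'en/' side once, since every EN counterpart is exactly 'en/'+JA) followed by one validation of the JA page.
import Mathlib
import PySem

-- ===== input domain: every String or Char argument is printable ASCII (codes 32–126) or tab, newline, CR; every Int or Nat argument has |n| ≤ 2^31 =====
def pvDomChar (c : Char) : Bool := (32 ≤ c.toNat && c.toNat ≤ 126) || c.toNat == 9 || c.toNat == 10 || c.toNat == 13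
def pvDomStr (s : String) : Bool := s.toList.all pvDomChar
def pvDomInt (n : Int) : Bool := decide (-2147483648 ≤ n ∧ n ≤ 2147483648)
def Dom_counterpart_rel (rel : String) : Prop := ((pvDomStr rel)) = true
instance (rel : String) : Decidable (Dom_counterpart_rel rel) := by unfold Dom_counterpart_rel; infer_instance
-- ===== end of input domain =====

-- B folds A's eight guards into one normalization (split off an optional "en/") plus one
-- validation of the JA page, exploiting that every EN counterpart is exactly "en/" + JA (objective: simpler).

-- ===== PORT A =====
def pvPairs : List (String × String) :=
  [("photographers/", "en/photographers/"), ("eras/", "en/eras/"),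
   ("countries/", "en/countries/"), ("movements/", "en/movements/")]

def pvLoopA (rel : String) : List (String × String) → Option (String × String)
  | [] => none
  | (jp, ep) :: rest =>
    if PySem.Str.startswith rel jp then
      some (rel, ep ++ PySem.Str.slice rel (some (PySem.Str.len jp)) none)
    else if PySem.Str.startswith rel ep then
      some (jp ++ PySem.Str.slice rel (some (PySem.Str.len ep)) none, rel)
    else pvLoopA rel rest

def counterpart_rel (rel : String) : Option (String × String) :=
  if rel = "index.html" then some ("index.html", "en/index.html")
  else if rel = "en/index.html" then some ("index.html", "en/index.html")
  else if rel = "archive.html" then some ("archive.html", "en/archive.html")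
  else if rel = "en/archive.html" then some ("archive.html", "en/archive.html")
  else pvLoopA rel pvPairs

-- ===== PORT B =====
def pvJaPrefixes : List String := ["photographers/", "eras/", "countries/", "movements/"]

def counterpart_rel_alt (rel : String) : Option (String × String) :=
  let ja_en : String × String :=
    if PySem.Str.startswith rel "en/" then (PySem.Str.slice rel (some 3) none, rel)
    else (rel, "en/" ++ rel)
  if ja_en.1 = "index.html" ∨ ja_en.1 = "archive.html" ∨
     pvJaPrefixes.any (fun p => PySem.Str.startswith ja_en.1 p) then some ja_en
  else none

-- ===== PRECONDITION & SPEC =====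
def Spec_counterpart_rel (rel : String) (out : Option (String × String)) : Prop := out = counterpart_rel_alt rel
instance (rel : String) (out : Option (String × String)) : Decidable (Spec_counterpart_rel rel out) := by unfold Spec_counterpart_rel; infer_instance

-- ===== CLAIM (what is proved, stated in full; the proofs are below) =====
def Claim_equal_counterpart_rel : Prop := ∀ (rel : String), Dom_counterpart_rel rel → Spec_counterpart_rel rel (counterpart_rel rel)

-- ===== LEMMAS AND PROOFS =====
def pvIndexL : List Char := ['i', 'n', 'd', 'e', 'x', '.', 'h', 't', 'm', 'l']
def pvArchiveL : List Char := ['a', 'r', 'c', 'h', 'i', 'v', 'e', '.', 'h', 't', 'm', 'l']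
def pvEnL : List Char := ['e', 'n', '/']
def pvPhotL : List Char := ['p', 'h', 'o', 't', 'o', 'g', 'r', 'a', 'p', 'h', 'e', 'r', 's', '/']
def pvErasL : List Char := ['e', 'r', 'a', 's', '/']
def pvCtryL : List Char := ['c', 'o', 'u', 'n', 't', 'r', 'i', 'e', 's', '/']
def pvMoveL : List Char := ['m', 'o', 'v', 'e', 'm', 'e', 'n', 't', 's', '/']

-- list-level mirror of A
def pvCharsA (l : List Char) : Option (List Char × List Char) :=
  if l = pvIndexL then some (pvIndexL, pvEnL ++ pvIndexL)
  else if l = pvEnL ++ pvIndexL then some (pvIndexL, pvEnL ++ pvIndexL)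
  else if l = pvArchiveL then some (pvArchiveL, pvEnL ++ pvArchiveL)
  else if l = pvEnL ++ pvArchiveL then some (pvArchiveL, pvEnL ++ pvArchiveL)
  else if pvPhotL.isPrefixOf l then some (l, (pvEnL ++ pvPhotL) ++ l.drop 14)
  else if (pvEnL ++ pvPhotL).isPrefixOf l then some (pvPhotL ++ l.drop 17, l)
  else if pvErasL.isPrefixOf l then some (l, (pvEnL ++ pvErasL) ++ l.drop 5)
  else if (pvEnL ++ pvErasL).isPrefixOf l then some (pvErasL ++ l.drop 8, l)
  else if pvCtryL.isPrefixOf l then some (l, (pvEnL ++ pvCtryL) ++ l.drop 10)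
  else if (pvEnL ++ pvCtryL).isPrefixOf l then some (pvCtryL ++ l.drop 13, l)
  else if pvMoveL.isPrefixOf l then some (l, (pvEnL ++ pvMoveL) ++ l.drop 10)
  else if (pvEnL ++ pvMoveL).isPrefixOf l then some (pvMoveL ++ l.drop 13, l)
  else none

-- list-level mirror of B
def pvCharsB (l : List Char) : Option (List Char × List Char) :=
  let je : List Char × List Char :=
    if pvEnL.isPrefixOf l then (l.drop 3, l) else (l, pvEnL ++ l)
  if je.1 = pvIndexL ∨ je.1 = pvArchiveL ∨ pvPhotL.isPrefixOf je.1 ∨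
     pvErasL.isPrefixOf je.1 ∨ pvCtryL.isPrefixOf je.1 ∨ pvMoveL.isPrefixOf je.1 then some je
  else none


theorem pv_str_eq_iff (s t : String) : s = t ↔ s.toList = t.toList := by
  constructor
  · intro h; rw [h]
  · intro h; exact String.ext (by simpa using h)

theorem pv_tl_index : "index.html".toList = pvIndexL := by decide
theorem pv_tl_archive : "archive.html".toList = pvArchiveL := by decide
theorem pv_tl_en : "en/".toList = pvEnL := by decide
theorem pv_tl_enindex : "en/index.html".toList = pvEnL ++ pvIndexL := by decide
theorem pv_tl_enarchive : "en/archive.html".toList = pvEnL ++ pvArchiveL := by decide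
theorem pv_tl_phot : "photographers/".toList = pvPhotL := by decide
theorem pv_tl_eras : "eras/".toList = pvErasL := by decide
theorem pv_tl_ctry : "countries/".toList = pvCtryL := by decide
theorem pv_tl_move : "movements/".toList = pvMoveL := by decide
theorem pv_tl_enphot : "en/photographers/".toList = pvEnL ++ pvPhotL := by decide
theorem pv_tl_eneras : "en/eras/".toList = pvEnL ++ pvErasL := by decide
theorem pv_tl_enctry : "en/countries/".toList = pvEnL ++ pvCtryL := by decide
theorem pv_tl_enmove : "en/movements/".toList = pvEnL ++ pvMoveL := by decide

theorem pv_lslice3 (l : List Char) : PySem.List.slice l (some 3) none = l.drop 3 := by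
  rw [PySem.List.slice_from] <;> simp

theorem pv_main (l : List Char) : pvCharsA l = pvCharsB l := by
  by_cases hp : pvEnL <+: l
  · obtain ⟨u, rfl⟩ := hp
    by_cases h1 : u = pvIndexL
    · subst h1; decide
    by_cases h2 : u = pvArchiveL
    · subst h2; decide
    by_cases h3 : pvPhotL <+: u
    · obtain ⟨v, rfl⟩ := h3
      simp [pvCharsA, pvCharsB, pvIndexL, pvArchiveL, pvEnL, pvPhotL, pvErasL, pvCtryL, pvMoveL]
    by_cases h4 : pvErasL <+: u
    · obtain ⟨v, rfl⟩ := h4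
      simp [pvCharsA, pvCharsB, pvIndexL, pvArchiveL, pvEnL, pvPhotL, pvErasL, pvCtryL, pvMoveL]
    by_cases h5 : pvCtryL <+: u
    · obtain ⟨v, rfl⟩ := h5
      simp [pvCharsA, pvCharsB, pvIndexL, pvArchiveL, pvEnL, pvPhotL, pvErasL, pvCtryL, pvMoveL]
    by_cases h6 : pvMoveL <+: u
    · obtain ⟨v, rfl⟩ := h6
      simp [pvCharsA, pvCharsB, pvIndexL, pvArchiveL, pvEnL, pvPhotL, pvErasL, pvCtryL, pvMoveL]
    · simp only [pvIndexL, pvArchiveL, pvPhotL, pvErasL, pvCtryL, pvMoveL] at h1 h2 h3 h4 h5 h6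
      simp [pvCharsA, pvCharsB, pvIndexL, pvArchiveL, pvEnL, pvPhotL, pvErasL, pvCtryL, pvMoveL, h1, h2, h3, h4, h5, h6]
  · have hnei : l ≠ pvEnL ++ pvIndexL := fun h => hp (h ▸ List.prefix_append _ _)
    have hnea : l ≠ pvEnL ++ pvArchiveL := fun h => hp (h ▸ List.prefix_append _ _)
    have hne1 : ¬ pvEnL ++ pvPhotL <+: l := fun h => hp ((List.prefix_append _ _).trans h)
    have hne2 : ¬ pvEnL ++ pvErasL <+: l := fun h => hp ((List.prefix_append _ _).trans h)
    have hne3 : ¬ pvEnL ++ pvCtryL <+: l := fun h => hp ((List.prefix_append _ _).trans h)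
    have hne4 : ¬ pvEnL ++ pvMoveL <+: l := fun h => hp ((List.prefix_append _ _).trans h)
    by_cases h1 : l = pvIndexL
    · subst h1; decide
    by_cases h2 : l = pvArchiveL
    · subst h2; decide
    by_cases h3 : pvPhotL <+: l
    · obtain ⟨v, rfl⟩ := h3
      simp [pvCharsA, pvCharsB, pvIndexL, pvArchiveL, pvEnL, pvPhotL, pvErasL, pvCtryL, pvMoveL]
    by_cases h4 : pvErasL <+: l
    · obtain ⟨v, rfl⟩ := h4
      simp [pvCharsA, pvCharsB, pvIndexL, pvArchiveL, pvEnL, pvPhotL, pvErasL, pvCtryL, pvMoveL]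
    by_cases h5 : pvCtryL <+: l
    · obtain ⟨v, rfl⟩ := h5
      simp [pvCharsA, pvCharsB, pvIndexL, pvArchiveL, pvEnL, pvPhotL, pvErasL, pvCtryL, pvMoveL]
    by_cases h6 : pvMoveL <+: l
    · obtain ⟨v, rfl⟩ := h6
      simp [pvCharsA, pvCharsB, pvIndexL, pvArchiveL, pvEnL, pvPhotL, pvErasL, pvCtryL, pvMoveL]
    · simp only [pvIndexL, pvArchiveL, pvEnL, pvPhotL, pvErasL, pvCtryL, pvMoveL] at h1 h2 h3 h4 h5 h6 hp hnei hnea hne1 hne2 hne3 hne4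
      simp only [List.cons_append, List.nil_append] at hnei hnea hne1 hne2 hne3 hne4
      simp [pvCharsA, pvCharsB, pvIndexL, pvArchiveL, pvEnL, pvPhotL, pvErasL, pvCtryL, pvMoveL, h1, h2, h3, h4, h5, h6, hp, hnei, hnea, hne1, hne2, hne3, hne4]

theorem pv_len_0 : PySem.Str.len "photographers/" = 14 := by decide
theorem pv_len_1 : PySem.Str.len "eras/" = 5 := by decide
theorem pv_len_2 : PySem.Str.len "countries/" = 10 := by decide
theorem pv_len_3 : PySem.Str.len "movements/" = 10 := by decide
theorem pv_len_4 : PySem.Str.len "en/photographers/" = 17 := by decide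
theorem pv_len_5 : PySem.Str.len "en/eras/" = 8 := by decide
theorem pv_len_6 : PySem.Str.len "en/countries/" = 13 := by decide
theorem pv_len_7 : PySem.Str.len "en/movements/" = 13 := by decide
theorem pv_lslice5 (l : List Char) : PySem.List.slice l (some 5) none = l.drop 5 := by
  rw [PySem.List.slice_from] <;> simp
theorem pv_lslice8 (l : List Char) : PySem.List.slice l (some 8) none = l.drop 8 := by
  rw [PySem.List.slice_from] <;> simp
theorem pv_lslice10 (l : List Char) : PySem.List.slice l (some 10) none = l.drop 10 := by
  rw [PySem.List.slice_from] <;> simp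
theorem pv_lslice13 (l : List Char) : PySem.List.slice l (some 13) none = l.drop 13 := by
  rw [PySem.List.slice_from] <;> simp
theorem pv_lslice14 (l : List Char) : PySem.List.slice l (some 14) none = l.drop 14 := by
  rw [PySem.List.slice_from] <;> simp
theorem pv_lslice17 (l : List Char) : PySem.List.slice l (some 17) none = l.drop 17 := by
  rw [PySem.List.slice_from] <;> simp

theorem pv_len_en : pvEnL.length = 3 := by decide
theorem pv_len_phot : pvPhotL.length = 14 := by decide
theorem pv_len_eras : pvErasL.length = 5 := by decide
theorem pv_len_ctry : pvCtryL.length = 10 := by decide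
theorem pv_len_move : pvMoveL.length = 10 := by decide

theorem pv_bridgeA (rel : String) :
    (counterpart_rel rel).map (fun p => (p.1.toList, p.2.toList)) = pvCharsA rel.toList := by
  simp only [counterpart_rel, pvCharsA, pvLoopA, pvPairs]
  simp [apply_ite (Option.map fun p : String × String => (p.1.toList, p.2.toList)),
        pv_str_eq_iff, PySem.Str.startswith, PySem.Chars.startswith,
        pv_tl_index, pv_tl_archive, pv_tl_en, pv_tl_enindex, pv_tl_enarchive,
        pv_tl_phot, pv_tl_eras, pv_tl_ctry, pv_tl_move,
        pv_tl_enphot, pv_tl_eneras, pv_tl_enctry, pv_tl_enmove,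
        pv_len_0, pv_len_1, pv_len_2, pv_len_3, pv_len_4, pv_len_5, pv_len_6, pv_len_7,
        pv_len_en, pv_len_phot, pv_len_eras, pv_len_ctry, pv_len_move,
        pv_lslice5, pv_lslice8, pv_lslice10, pv_lslice13, pv_lslice14, pv_lslice17]

theorem pv_bridgeB (rel : String) :
    (counterpart_rel_alt rel).map (fun p => (p.1.toList, p.2.toList)) = pvCharsB rel.toList := by
  simp only [counterpart_rel_alt, pvCharsB, pvJaPrefixes]
  simp [apply_ite (Option.map fun p : String × String => (p.1.toList, p.2.toList)),
        pv_str_eq_iff, PySem.Str.startswith, PySem.Chars.startswith,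
        pv_tl_index, pv_tl_archive, pv_tl_en, pv_tl_phot, pv_tl_eras, pv_tl_ctry, pv_tl_move,
        List.any_cons, List.any_nil]
  by_cases hp : pvEnL <+: rel.toList <;> simp [hp, pv_lslice3] <;> simp [pvEnL]

theorem pv_opt_ext (a b : Option (String × String))
    (h : a.map (fun p => (p.1.toList, p.2.toList)) = b.map (fun p => (p.1.toList, p.2.toList))) :
    a = b := by
  cases a with
  | none => cases b with
    | none => rfl
    | some q => simp at h
  | some p => cases b with
    | none => simp at h
    | some q =>
      obtain ⟨p1, p2⟩ := p
      obtain ⟨q1, q2⟩ := q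
      simp only [Option.map_some, Option.some.injEq, Prod.mk.injEq] at h ⊢
      exact ⟨String.ext (by simpa using h.1), String.ext (by simpa using h.2)⟩

-- ===== VERDICT (by name: the statement is the Claim_ definition above) =====
theorem counterpart_rel_spec : Claim_equal_counterpart_rel := by
  intro rel _
  unfold Spec_counterpart_rel
  exact pv_opt_ext _ _ (by rw [pv_bridgeA, pv_bridgeB, pv_main])
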